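-- pv_equiv track=rewrite | github.com/JilmarManga/Alfred_Project-otto-life-Co-Pilot | app/handlers/pending_list_handler.py | _match_list_name
-- ===== SOURCE A (Python) =====
-- from typing import Optional
--
-- _ORDINAL_WORDS = {
--     0: {"1", "uno", "una", "primera", "primero", "first", "1st"},
--     1: {"2", "dos", "segunda", "segundo", "second", "2nd"},
--     2: {"3", "tres", "tercera", "tercero", "third", "3rd"},
-- }
--
-- def _match_list_name(text: str, list_names: list) -> Optional[str]:
--     """Return a list name from `list_names` if the user's reply matches one
--     (case-insensitive, substring, or ordinal). None if nothing matches."""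
--     lower = text.lower().strip()
--     if not lower:
--         return None
--
--     # Exact case-insensitive name match
--     for name in list_names:
--         if (name or "").lower().strip() == lower:
--             return name
--
--     # Substring: user typed the list name somewhere in a short reply
--     for name in list_names:
--         nl = (name or "").lower().strip()
--         if nl and nl in lower:
--             return name
--
--     # Ordinal ("1", "first", "la primera", etc.)
--     for idx, words in _ORDINAL_WORDS.items():
--         if lower in words and idx < len(list_names):
--             return list_names[idx]
--
--     return None
-- ===== SOURCE B (Python) =====
-- from typing import Optional
--
-- # flat word -> index table (the ordinal word sets are pairwise disjoint)
-- _ORDINAL_INDEX = {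
--     "1": 0, "uno": 0, "una": 0, "primera": 0, "primero": 0, "first": 0, "1st": 0,
--     "2": 1, "dos": 1, "segunda": 1, "segundo": 1, "second": 1, "2nd": 1,
--     "3": 2, "tres": 2, "tercera": 2, "tercero": 2, "third": 2, "3rd": 2,
-- }
--
-- def _match_list_name(text: str, list_names: list) -> Optional[str]:
--     """Single pass over list_names: return an exact match eagerly, remember the
--     first substring match as a fallback; then one flat dict lookup for ordinals."""
--     lower = text.lower().strip()
--     if not lower:
--         return None
--
--     substring_match = None
--     for name in list_names:
--         nl = (name or "").lower().strip()
--         if nl == lower: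
--             return name
--         if nl and nl in lower and substring_match is None:
--             substring_match = name
--
--     if substring_match is not None:
--         return substring_match
--
--     idx = _ORDINAL_INDEX.get(lower)
--     if idx is not None and idx < len(list_names):
--         return list_names[idx]
--     return None
-- ===== Notes on version B (the rewrite author's own statement) =====
-- stated objective: alternative
-- what changed: The two separate exact and substring scans over list_names are fused into one pass that returns exact matches eagerly and remembers the first substring match as a fallback, and the nested ordinal dict-of-sets scan is replaced by a single lookup in a flat word-to-index dict.
import Mathlib
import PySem

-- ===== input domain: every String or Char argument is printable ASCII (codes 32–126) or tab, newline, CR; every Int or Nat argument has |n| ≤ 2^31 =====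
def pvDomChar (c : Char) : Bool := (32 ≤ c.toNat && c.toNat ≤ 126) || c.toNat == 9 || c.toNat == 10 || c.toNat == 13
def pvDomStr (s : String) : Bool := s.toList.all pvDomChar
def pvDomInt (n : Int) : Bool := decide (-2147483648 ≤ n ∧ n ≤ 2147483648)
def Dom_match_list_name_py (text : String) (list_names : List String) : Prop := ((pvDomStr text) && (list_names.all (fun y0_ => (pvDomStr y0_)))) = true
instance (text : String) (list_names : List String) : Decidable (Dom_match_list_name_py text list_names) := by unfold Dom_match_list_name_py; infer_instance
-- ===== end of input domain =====

-- B fuses A's two scans over list_names into one pass with a first-substring-match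
-- fallback, and replaces the ordinal dict-of-sets scan by one flat word→index lookup
-- (objective: alternative; same asymptotic cost).


-- ===== PORT A =====
-- (name or "").lower().strip(): for a string, `name or ""` is `name` itself when
-- non-empty and "" when empty, so it is the identity; we normalise `name` directly.
def pvNorm (s : String) : String := PySem.Str.strip (PySem.Str.lower s)

-- _ORDINAL_WORDS: dict idx → set of words (all literal elements distinct)
def pvOrdinalWords : List (Nat × PySem.Set String) :=
  [(0, PySem.Set.ofList ["1", "uno", "una", "primera", "primero", "first", "1st"]),
   (1, PySem.Set.ofList ["2", "dos", "segunda", "segundo", "second", "2nd"]),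
   (2, PySem.Set.ofList ["3", "tres", "tercera", "tercero", "third", "3rd"])]

-- first loop of A: exact case-insensitive match
def pvAExact (lower : String) : List String → Option String
  | [] => none
  | name :: rest =>
    if pvNorm name = lower then some name else pvAExact lower rest

-- second loop of A: first substring match
def pvASub (lower : String) : List String → Option String
  | [] => none
  | name :: rest =>
    if pvNorm name ≠ "" ∧ PySem.Str.isIn (pvNorm name) lower then some name
    else pvASub lower rest

-- third loop of A: ordinal words (list_names[idx] is guarded by idx < len, so getD is exact)
def pvAOrd (lower : String) (names : List String) : List (Nat × PySem.Set String) → Option String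
  | [] => none
  | (idx, words) :: rest =>
    if PySem.Set.contains words lower ∧ idx < names.length then some (names.getD idx "")
    else pvAOrd lower names rest

def match_list_name_py (text : String) (list_names : List String) : Option String :=
  let lower := pvNorm text
  if lower = "" then none
  else match pvAExact lower list_names with
    | some r => some r
    | none => match pvASub lower list_names with
      | some r => some r
      | none => pvAOrd lower list_names pvOrdinalWords

-- ===== PORT B =====
-- flat word → index dict (insertion order; looked up with .get)
def pvOrdinalIndex : PySem.Dict String Nat :=
  PySem.Dict.ofList
  [("1", 0), ("uno", 0), ("una", 0), ("primera", 0), ("primero", 0), ("first", 0), ("1st", 0),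
   ("2", 1), ("dos", 1), ("segunda", 1), ("segundo", 1), ("second", 1), ("2nd", 1),
   ("3", 2), ("tres", 2), ("tercera", 2), ("tercero", 2), ("third", 2), ("3rd", 2)]

-- B's single loop: eager exact return, `cand` is the first substring match so far
def pvBLoop (lower : String) : List String → Option String → Option String
  | [], cand => cand
  | name :: rest, cand =>
    let nl := pvNorm name
    if nl = lower then some name
    else if nl ≠ "" ∧ PySem.Str.isIn nl lower ∧ cand = none then
      pvBLoop lower rest (some name)
    else pvBLoop lower rest cand

def match_list_name_py_alt (text : String) (list_names : List String) : Option String :=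
  let lower := pvNorm text
  if lower = "" then none
  else match pvBLoop lower list_names none with
    | some r => some r
    | none =>
      match PySem.Dict.get? pvOrdinalIndex lower with
      | some idx => if idx < list_names.length then some (list_names.getD idx "") else none
      | none => none

-- ===== PRECONDITION & SPEC =====
def Spec_match_list_name_py (text : String) (list_names : List String) (out : Option String) : Prop := out = match_list_name_py_alt text list_names
instance (text : String) (list_names : List String) (out : Option String) : Decidable (Spec_match_list_name_py text list_names out) := by unfold Spec_match_list_name_py; infer_instance

-- ===== CLAIM (what is proved, stated in full; the proofs are below) =====
def Claim_equal_match_list_name_py : Prop := ∀ (text : String) (list_names : List String), Dom_match_list_name_py text list_names → Spec_match_list_name_py text list_names (match_list_name_py text list_names)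

-- ===== LEMMAS AND PROOFS =====

-- B's fused loop = A's exact scan, falling back to the pending candidate, then A's substring scan
theorem pvBLoop_eq (lower : String) (names : List String) (cand : Option String) :
    pvBLoop lower names cand =
      match pvAExact lower names with
      | some r => some r
      | none => match cand with
        | some c => some c
        | none => pvASub lower names := by
  induction names generalizing cand with
  | nil => cases cand <;> simp [pvBLoop, pvAExact, pvASub]
  | cons name rest ih =>
    by_cases hx : pvNorm name = lower
    · simp [pvBLoop, pvAExact, hx]
    · by_cases hs : pvNorm name ≠ "" ∧ PySem.Str.isIn (pvNorm name) lower
      · cases cand <;> cases hA : pvAExact lower rest <;>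
          simp [pvBLoop, pvAExact, pvASub, hx, hs, ih, hA]
      · cases cand <;> cases hA : pvAExact lower rest <;>
          simp [pvBLoop, pvAExact, pvASub, hx, ih, hA]

-- A's scan over the dict-of-sets = one lookup in the flat word→index dict
theorem pvOrd_eq (lower : String) (names : List String) :
    pvAOrd lower names pvOrdinalWords =
      match PySem.Dict.get? pvOrdinalIndex lower with
      | some idx => if idx < names.length then some (names.getD idx "") else none
      | none => none := by
  by_cases hm : lower = "1" ∨ lower = "uno" ∨ lower = "una" ∨ lower = "primera" ∨ lower = "primero" ∨ lower = "first" ∨ lower = "1st" ∨ lower = "2" ∨ lower = "dos" ∨ lower = "segunda" ∨ lower = "segundo" ∨ lower = "second" ∨ lower = "2nd" ∨ lower = "3" ∨ lower = "tres" ∨ lower = "tercera" ∨ lower = "tercero" ∨ lower = "third" ∨ lower = "3rd"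
  · rcases hm with h|h|h|h|h|h|h|h|h|h|h|h|h|h|h|h|h|h|h <;> subst h <;>
      rw [show PySem.Dict.get? pvOrdinalIndex _ = some _ from rfl] <;>
      simp [pvAOrd, pvOrdinalWords]
  · push Not at hm
    obtain ⟨n0,n1,n2,n3,n4,n5,n6,n7,n8,n9,n10,n11,n12,n13,n14,n15,n16,n17,n18⟩ := hm
    have hitems : pvOrdinalIndex.items = [("1", 0), ("uno", 0), ("una", 0), ("primera", 0), ("primero", 0), ("first", 0), ("1st", 0), ("2", 1), ("dos", 1), ("segunda", 1), ("segundo", 1), ("second", 1), ("2nd", 1), ("3", 2), ("tres", 2), ("tercera", 2), ("tercero", 2), ("third", 2), ("3rd", 2)] := by rfl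
    simp [pvAOrd, pvOrdinalWords, PySem.Dict.get?, hitems, List.find?,
      n0, n1, n2, n3, n4, n5, n6, n7, n8, n9, n10, n11, n12, n13, n14, n15, n16, n17, n18, beq_eq_false_iff_ne.mpr (Ne.symm n0), beq_eq_false_iff_ne.mpr (Ne.symm n1), beq_eq_false_iff_ne.mpr (Ne.symm n2), beq_eq_false_iff_ne.mpr (Ne.symm n3), beq_eq_false_iff_ne.mpr (Ne.symm n4), beq_eq_false_iff_ne.mpr (Ne.symm n5), beq_eq_false_iff_ne.mpr (Ne.symm n6), beq_eq_false_iff_ne.mpr (Ne.symm n7), beq_eq_false_iff_ne.mpr (Ne.symm n8), beq_eq_false_iff_ne.mpr (Ne.symm n9), beq_eq_false_iff_ne.mpr (Ne.symm n10), beq_eq_false_iff_ne.mpr (Ne.symm n11), beq_eq_false_iff_ne.mpr (Ne.symm n12), beq_eq_false_iff_ne.mpr (Ne.symm n13), beq_eq_false_iff_ne.mpr (Ne.symm n14), beq_eq_false_iff_ne.mpr (Ne.symm n15), beq_eq_false_iff_ne.mpr (Ne.symm n16), beq_eq_false_iff_ne.mpr (Ne.symm n17), beq_eq_false_iff_ne.mpr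 (Ne.symm n18)]

-- ===== VERDICT (by name: the statement is the Claim_ definition above) =====
theorem match_list_name_py_spec : Claim_equal_match_list_name_py := by
  intro text list_names _
  unfold Spec_match_list_name_py match_list_name_py match_list_name_py_alt
  by_cases h : pvNorm text = ""
  · simp [h]
  · simp only [h, pvBLoop_eq, pvOrd_eq]
    cases pvAExact (pvNorm text) list_names <;> simp
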